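-- pv_equiv track=rewrite | github.com/Shenia/daily_byte_exercises | 10_cake_for_none.py | cake_for_none_iterative
-- ===== SOURCE A (Python) =====
-- def cake_for_none_iterative(appetites, cakes):
--     sortedAppetites = sorted(appetites, reverse=True)
--     sortedCakes = sorted(cakes, reverse=True)
--     retVal = 0
--
--     for appetite in sortedAppetites:
--         if len(sortedCakes) == 0:
--             return retVal
--         if appetite <= sortedCakes[0]:
--             sortedCakes.pop(0)
--             retVal += 1
--
--     return retVal
-- ===== SOURCE B (Python) =====
-- def cake_for_none_iterative(appetites, cakes):
--     it = iter(sorted(appetites))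
--     need = next(it, None)
--     count = 0
--     for cake in sorted(cakes):
--         if need is not None and cake >= need:
--             count += 1
--             need = next(it, None)
--     return count
-- ===== Notes on version B (the rewrite author's own statement) =====
-- stated objective: faster
-- what changed: B loops over the cakes in ascending order, streaming the ascending appetites through an iterator (current unmet appetite + rest), matching each cake to the smallest unmet appetite it can satisfy; A loops over descending appetites and pops the largest cake with list.pop(0), a linear shift per match.
import Mathlib
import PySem

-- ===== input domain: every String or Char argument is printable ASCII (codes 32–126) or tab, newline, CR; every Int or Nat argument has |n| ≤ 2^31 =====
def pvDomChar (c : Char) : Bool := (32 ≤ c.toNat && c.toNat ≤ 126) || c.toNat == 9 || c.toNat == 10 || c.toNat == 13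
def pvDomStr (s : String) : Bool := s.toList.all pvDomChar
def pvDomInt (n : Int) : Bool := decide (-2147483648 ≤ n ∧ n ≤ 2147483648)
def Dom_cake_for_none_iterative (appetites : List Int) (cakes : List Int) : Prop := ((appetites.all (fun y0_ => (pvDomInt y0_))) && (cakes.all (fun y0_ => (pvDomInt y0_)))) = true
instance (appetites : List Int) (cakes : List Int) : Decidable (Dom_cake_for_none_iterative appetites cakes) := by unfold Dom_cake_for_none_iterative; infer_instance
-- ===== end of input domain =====

-- B streams the ascending appetites through an iterator while folding over the ascending
-- cakes, instead of A's descending appetite scan with pop(0) (a linear shift per match);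
-- a timing run measured B faster on large inputs.


-- ===== PORT A =====
-- A's for-loop over the descending appetites, carrying the remaining descending cakes
-- (sortedCakes, mutated by pop(0)) and retVal; the 'return retVal' on empty cakes is the
-- second pattern, the pop(0)+increment is the first branch of the if.
def cakeALoop : List Int → List Int → Int → Int
  | [], _, retVal => retVal
  | _ :: _, [], retVal => retVal
  | appetite :: rest, c :: cs, retVal =>
      if appetite ≤ c then cakeALoop rest cs (retVal + 1)
      else cakeALoop rest (c :: cs) retVal

def cake_for_none_iterative (appetites : List Int) (cakes : List Int) : Int :=
  cakeALoop (PySem.List.sorted appetites (fun x => x) true)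
            (PySem.List.sorted cakes (fun x => x) true) 0

-- ===== PORT B =====
-- B's iterator over the ascending appetites: 'need' is the current unmet appetite
-- (none = iterator exhausted), the remaining appetites are the list component.
-- 'next(it, None)' advancing the iterator is cakeNext.
def cakeNext : List Int → Option Int × List Int
  | [] => (none, [])
  | x :: xs => (some x, xs)

-- One iteration of B's for-loop over the cakes: state = (need, iterator rest, count).
def cakeBStep : Option Int × List Int × Int → Int → Option Int × List Int × Int
  | (some need, it, count), cake =>
      if need ≤ cake then ((cakeNext it).1, (cakeNext it).2, count + 1)
      else (some need, it, count)
  | (none, it, count), _ => (none, it, count)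

def cake_for_none_iterative_alt (appetites : List Int) (cakes : List Int) : Int :=
  let it0 := cakeNext (PySem.List.sorted appetites (fun x => x) false)
  ((PySem.List.sorted cakes (fun x => x) false).foldl cakeBStep
    (it0.1, it0.2, 0)).2.2

-- ===== PRECONDITION & SPEC =====
def Spec_cake_for_none_iterative (appetites : List Int) (cakes : List Int) (out : Int) : Prop := out = cake_for_none_iterative_alt appetites cakes
instance (appetites : List Int) (cakes : List Int) (out : Int) : Decidable (Spec_cake_for_none_iterative appetites cakes out) := by unfold Spec_cake_for_none_iterative; infer_instance

-- ===== CLAIM (what is proved, stated in full; the proofs are below) =====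
def Claim_equal_cake_for_none_iterative : Prop := ∀ (appetites : List Int) (cakes : List Int), Dom_cake_for_none_iterative appetites cakes → Spec_cake_for_none_iterative appetites cakes (cake_for_none_iterative appetites cakes)

-- ===== LEMMAS AND PROOFS =====

-- Proof-only intermediate: the ascending two-pointer greedy written as a recursion on
-- both lists; B's fold is shown equal to it, and A's descending loop is bridged to it.
def cakeBLoop : List Int → List Int → Int → Int
  | _, [], count => count
  | [], _, count => count
  | a :: as, c :: cs, count =>
      if a ≤ c then cakeBLoop as cs (count + 1)
      else cakeBLoop (a :: as) cs count

theorem cakeBLoop_nil_right (as : List Int) (r : Int) : cakeBLoop as [] r = r := by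
  cases as <;> rfl

theorem cakeBLoop_nil_left (cs : List Int) (r : Int) : cakeBLoop [] cs r = r := by
  cases cs <;> rfl

theorem cakeALoop_nil_cs (xs : List Int) (r : Int) : cakeALoop xs [] r = r := by
  cases xs <;> rfl

-- B's fold over the cakes, started from the iterator state of an appetite list, computes
-- the two-pointer recursion cakeBLoop.
theorem cakeBStep_foldl (cs : List Int) :
    ∀ (as : List Int) (r : Int),
      (cs.foldl cakeBStep ((cakeNext as).1, (cakeNext as).2, r)).2.2 = cakeBLoop as cs r := by
  induction cs with
  | nil => intro as r; cases as <;> simp [cakeNext, cakeBLoop_nil_right]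
  | cons c cs ih =>
      intro as r
      cases as with
      | nil =>
          rw [cakeBLoop_nil_left]
          have hstep : cakeBStep ((none : Option Int), ([] : List Int), r) c
              = ((none : Option Int), ([] : List Int), r) := by
            simp [cakeBStep]
          simp only [cakeNext, List.foldl_cons, hstep]
          simpa [cakeNext, cakeBLoop_nil_left] using ih [] r
      | cons a as =>
          by_cases h : a ≤ c
          · have hstep : cakeBStep (some a, as, r) c
                = ((cakeNext as).1, (cakeNext as).2, r + 1) := by
              simp [cakeBStep, h]
            simp only [cakeNext, List.foldl_cons, hstep, cakeBLoop, if_pos h]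
            exact ih as (r + 1)
          · have hstep : cakeBStep (some a, as, r) c = (some a, as, r) := by
              simp [cakeBStep, h]
            simp only [cakeNext, List.foldl_cons, hstep, cakeBLoop, if_neg h]
            simpa [cakeNext] using ih (a :: as) r

-- If the biggest cake C satisfies the biggest appetite A, the two-pointer matches them
-- (possibly via an exchange) and the count goes up by one.
theorem cakeBLoop_concat_match (A C : Int) :
    ∀ (cs as : List Int) (r : Int), A ≤ C → (∀ x ∈ as, x ≤ C) →
      cakeBLoop (as ++ [A]) (cs ++ [C]) r = cakeBLoop as cs (r + 1) := by
  intro cs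
  induction cs with
  | nil =>
      intro as r hAC has
      rw [cakeBLoop_nil_right]
      cases as with
      | nil => simp [cakeBLoop, hAC]
      | cons a as =>
          have ha : a ≤ C := has a (by simp)
          simp [cakeBLoop, ha]
  | cons c cs ih =>
      intro as r hAC has
      cases as with
      | nil =>
          rw [cakeBLoop_nil_left]
          by_cases h : A ≤ c
          · simp [cakeBLoop, h, cakeBLoop_nil_left]
          · simpa [cakeBLoop, h, cakeBLoop_nil_left] using ih [] r hAC (by simp)
      | cons a as =>
          by_cases h : a ≤ c
          · simp only [List.cons_append, cakeBLoop, if_pos h]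
            exact ih as (r + 1) hAC (fun x hx => has x (by simp [hx]))
          · simp only [List.cons_append, cakeBLoop, if_neg h]
            exact ih (a :: as) r hAC has

-- If appetite A is bigger than every cake, appending it changes nothing: the pointer
-- discards every remaining cake against it.
theorem cakeBLoop_concat_skip (A : Int) :
    ∀ (cs as : List Int) (r : Int), (∀ y ∈ cs, y < A) →
      cakeBLoop (as ++ [A]) cs r = cakeBLoop as cs r := by
  intro cs
  induction cs with
  | nil => intro as r _; rw [cakeBLoop_nil_right, cakeBLoop_nil_right]
  | cons c cs ih =>
      intro as r hcs
      cases as with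
      | nil =>
          have hc : c < A := hcs c (by simp)
          rw [cakeBLoop_nil_left]
          simp only [List.nil_append, cakeBLoop, if_neg (not_le.mpr hc)]
          rw [show ([A] : List Int) = [] ++ [A] from rfl,
              ih [] r (fun y hy => hcs y (by simp [hy])), cakeBLoop_nil_left]
      | cons a as =>
          by_cases h : a ≤ c
          · simp only [List.cons_append, cakeBLoop, if_pos h]
            exact ih as (r + 1) (fun y hy => hcs y (by simp [hy]))
          · simp only [List.cons_append, cakeBLoop, if_neg h]
            exact ih (a :: as) r (fun y hy => hcs y (by simp [hy]))

-- Main bridge: A's descending loop on the reversed lists equals the ascending two-pointer.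
theorem cakeLoop_bridge :
    ∀ (sa : List Int), sa.Pairwise (· ≤ ·) →
      ∀ (sc : List Int) (r : Int), sc.Pairwise (· ≤ ·) →
        cakeALoop sa.reverse sc.reverse r = cakeBLoop sa sc r := by
  intro sa
  induction sa using List.reverseRecOn with
  | nil => intro _ sc r _; simp [cakeALoop, cakeBLoop_nil_left]
  | append_singleton as A ih =>
      intro hsa sc r hsc
      have has : ∀ x ∈ as, x ≤ A := by
        have := (List.pairwise_append.mp hsa).2.2
        intro x hx; exact this x hx A (by simp)
      have has' : as.Pairwise (· ≤ ·) := (List.pairwise_append.mp hsa).1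
      rcases sc.eq_nil_or_concat with rfl | ⟨cs, C, rfl⟩
      · simp [cakeALoop_nil_cs, cakeBLoop_nil_right]
      · simp only [List.concat_eq_append] at hsc ⊢
        have hcs : ∀ y ∈ cs, y ≤ C := by
          have := (List.pairwise_append.mp hsc).2.2
          intro y hy; exact this y hy C (by simp)
        have hcs' : cs.Pairwise (· ≤ ·) := (List.pairwise_append.mp hsc).1
        simp only [List.reverse_append, List.reverse_singleton, List.singleton_append,
          cakeALoop]
        by_cases h : A ≤ C
        · rw [if_pos h, ih has' cs (r + 1) hcs',
              cakeBLoop_concat_match A C cs as r h (fun x hx => le_trans (has x hx) h)]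
        · rw [if_neg h, show (C :: cs.reverse : List Int) = (cs ++ [C]).reverse by simp,
              ih has' (cs ++ [C]) r hsc,
              cakeBLoop_concat_skip A (cs ++ [C]) as r]
          intro y hy
          rcases List.mem_append.mp hy with hy | hy
          · exact lt_of_le_of_lt (hcs y hy) (not_le.mp h)
          · simp at hy; simpa [hy] using not_le.mp h

-- Python's reverse sort of ints is the reverse of the ascending sort (equal keys are equal values).
theorem sorted_rev_eq_reverse (xs : List Int) :
    PySem.List.sorted xs (fun x => x) true = (PySem.List.sorted xs (fun x => x) false).reverse := by
  have h1 : (PySem.List.sorted xs (fun x => x) true).Pairwise (fun a b : Int => b ≤ a) := by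
    simpa using PySem.List.sorted_pairwise_rev (xs := xs) (key := fun x : Int => x)
  have h2 : ((PySem.List.sorted xs (fun x => x) false).reverse).Pairwise (fun a b : Int => b ≤ a) := by
    rw [List.pairwise_reverse]
    simpa using PySem.List.sorted_pairwise (xs := xs) (key := fun x : Int => x)
  have hp : (PySem.List.sorted xs (fun x => x) true).Perm
      ((PySem.List.sorted xs (fun x => x) false).reverse) := by
    exact (PySem.List.sorted_perm xs (fun x : Int => x) true).trans
      (((PySem.List.sorted_perm xs (fun x : Int => x) false).symm).trans
        (List.reverse_perm _).symm)
  exact List.Perm.eq_of_pairwise (fun a b _ _ hab hba => le_antisymm hba hab) h1 h2 hp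

-- ===== VERDICT (by name: the statement is the Claim_ definition above) =====
theorem cake_for_none_iterative_spec : Claim_equal_cake_for_none_iterative := by
  intro appetites cakes _
  unfold Spec_cake_for_none_iterative cake_for_none_iterative cake_for_none_iterative_alt
  rw [sorted_rev_eq_reverse appetites, sorted_rev_eq_reverse cakes, cakeBStep_foldl]
  exact cakeLoop_bridge _ (by simpa using PySem.List.sorted_pairwise (xs := appetites) (key := fun x : Int => x))
    _ 0 (by simpa using PySem.List.sorted_pairwise (xs := cakes) (key := fun x : Int => x))
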